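-- pv_equiv track=rewrite | github.com/benjaminaho/word-clustering | word_trigrams.py | trigramize
-- ===== SOURCE A (Python) =====
-- def trigramize(orgstr):
--     ans = [l for l in orgstr]
--     altstr = ' ' + orgstr + ' '
--     for i in range(1, len(altstr)-1):
--         ans.append(altstr[i-1:i+1])
--         ans.append(altstr[i-1:i+2])
--     ans.append(altstr[-2] + ' ')
--     return ans
-- ===== SOURCE B (Python) =====
-- def trigramize(orgstr):
--     # One-pass streaming state machine over the characters: no index
--     # arithmetic, no slicing; carries the previous character and the
--     # pending bigram, emitting bigram then trigram as each char arrives.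
--     out = list(orgstr)
--     prev = ' '
--     bigram = None
--     for c in orgstr + ' ':
--         if bigram is not None:
--             out.append(bigram)
--             out.append(bigram + c)
--         bigram = prev + c
--         prev = c
--     out.append(bigram)
--     return out
-- ===== Notes on version B (the rewrite author's own statement) =====
-- stated objective: alternative
-- what changed: Replaces the index loop that slices the padded string at each position by a single streaming pass over the characters, a state machine carrying the previous character and the pending bigram and never using indices or slices.
import Mathlib
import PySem

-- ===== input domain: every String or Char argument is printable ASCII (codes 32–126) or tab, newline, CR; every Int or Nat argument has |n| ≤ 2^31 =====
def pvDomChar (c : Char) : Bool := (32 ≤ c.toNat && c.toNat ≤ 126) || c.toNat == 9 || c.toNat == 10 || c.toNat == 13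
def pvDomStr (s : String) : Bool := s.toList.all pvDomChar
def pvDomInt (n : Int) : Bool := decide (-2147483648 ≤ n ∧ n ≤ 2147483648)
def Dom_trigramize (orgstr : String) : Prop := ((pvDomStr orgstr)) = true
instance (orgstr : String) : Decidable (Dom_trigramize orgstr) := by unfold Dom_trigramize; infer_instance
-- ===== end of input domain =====

-- B replaces A's index loop over slices of the padded string by a single streaming
-- pass over the characters that carries the previous character and the pending
-- bigram as state; same O(n) cost, a different decomposition (no indices, no slices).

-- ===== PORT A =====
def trigramize (orgstr : String) : List String :=
  let ans := orgstr.toList.map (fun l => String.ofList [l])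
  let altstr := ' ' :: (orgstr.toList ++ [' '])
  let ans := (PySem.List.pyRange 1 ((altstr.length : Int) - 1) 1).foldl
    (fun acc i =>
      (acc ++ [String.ofList (PySem.List.slice altstr (some (i - 1)) (some (i + 1)))])
        ++ [String.ofList (PySem.List.slice altstr (some (i - 1)) (some (i + 2)))]) ans
  ans ++ [String.ofList [PySem.List.pyGetD altstr (-2) ' ', ' ']]

-- ===== PORT B =====
-- one loop iteration of Source B (strings kept as List Char; String.ofList at emission is exact)
def pvStepB (st : List String × Char × Option (List Char)) (c : Char) :
    List String × Char × Option (List Char) :=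
  let out := match st.2.2 with
    | some b => st.1 ++ [String.ofList b, String.ofList (b ++ [c])]
    | none => st.1
  (out, c, some [st.2.1, c])

def trigramize_alt (orgstr : String) : List String :=
  let st := (orgstr.toList ++ [' ']).foldl pvStepB
      (orgstr.toList.map (fun l => String.ofList [l]), ' ', (none : Option (List Char)))
  st.1 ++ [String.ofList (st.2.2.getD [])]

-- ===== PRECONDITION & SPEC =====
def Spec_trigramize (orgstr : String) (out : List String) : Prop := out = trigramize_alt orgstr
instance (orgstr : String) (out : List String) : Decidable (Spec_trigramize orgstr out) := by unfold Spec_trigramize; infer_instance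

-- ===== CLAIM (what is proved, stated in full; the proofs are below) =====
def Claim_equal_trigramize : Prop := ∀ (orgstr : String), Dom_trigramize orgstr → Spec_trigramize orgstr (trigramize orgstr)

-- ===== LEMMAS AND PROOFS =====

-- common recursive description of the bigram/trigram tail of both outputs
def pvTail : Char → Char → List Char → List String
  | a, b, [] => [String.ofList [a, b]]
  | a, b, c :: rest => String.ofList [a, b] :: String.ofList [a, b, c] :: pvTail b c rest

lemma pv_foldl_two (l : List α) (f g : α → String) (init : List String) :
    l.foldl (fun acc x => (acc ++ [f x]) ++ [g x]) init
      = init ++ l.flatMap (fun x => [f x, g x]) := by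
  induction l generalizing init with
  | nil => simp
  | cons a l ih => rw [List.foldl_cons, ih]; simp [List.flatMap_cons]

lemma pvB (l : List Char) (a b : Char) (out : List String) :
    (let st := l.foldl pvStepB (out, b, some [a, b]);
      st.1 ++ [String.ofList (st.2.2.getD [])]) = out ++ pvTail a b l := by
  induction l generalizing a b out with
  | nil => simp [pvTail]
  | cons c rest ih =>
      simp only [List.foldl_cons, pvStepB]
      rw [ih]
      simp [pvTail]

lemma pvA (l : List Char) (a b : Char) :
    (List.range l.length).flatMap
        (fun k => [String.ofList (((a :: b :: l).drop k).take 2),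
                   String.ofList (((a :: b :: l).drop k).take 3)])
      ++ [String.ofList (((a :: b :: l).drop l.length).take 2)]
    = pvTail a b l := by
  induction l generalizing a b with
  | nil => simp [pvTail]
  | cons c rest ih =>
      rw [List.length_cons, List.range_succ_eq_map, List.flatMap_cons, List.flatMap_map]
      simp only [List.drop_zero, List.drop_succ_cons]
      rw [List.append_assoc]
      rw [ih b c]
      simp [pvTail]

-- ===== VERDICT (by name: the statement is the Claim_ definition above) =====
theorem trigramize_spec : Claim_equal_trigramize := by
  intro orgstr _
  unfold Spec_trigramize trigramize trigramize_alt
  generalize orgstr.toList = cs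
  cases cs with
  | nil => decide
  | cons c cs' =>
      -- B side
      simp only [List.cons_append, List.foldl_cons, pvStepB]
      rw [pvB]
      -- A side
      simp only [pv_foldl_two, PySem.List.pyRange_one, List.flatMap_map]
      have e1 : (((' ' :: c :: (cs' ++ [' '])).length : Int) - 1 - 1).toNat
          = (cs' ++ [' ']).length := by simp
      rw [e1]
      have hsl : ∀ k : Nat,
          [String.ofList (PySem.List.slice (' ' :: c :: (cs' ++ [' ']))
              (some (1 + (k : Int) - 1)) (some (1 + (k : Int) + 1))),
            String.ofList (PySem.List.slice (' ' :: c :: (cs' ++ [' ']))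
              (some (1 + (k : Int) - 1)) (some (1 + (k : Int) + 2)))]
          = [String.ofList ((((' ' :: c :: (cs' ++ [' '])).drop k)).take 2),
             String.ofList ((((' ' :: c :: (cs' ++ [' '])).drop k)).take 3)] := by
        intro k
        have h2 : (1 + (k : Int) - 1) = ((k : Nat) : Int) := by ring
        have h3 : (1 + (k : Int) + 1) = (((k + 2 : Nat)) : Int) := by push_cast; ring
        have h4 : (1 + (k : Int) + 2) = (((k + 3 : Nat)) : Int) := by push_cast; ring
        rw [h2, h3, h4, PySem.List.slice_natCast, PySem.List.slice_natCast]
        have : k + 2 - k = 2 := by omega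
        have h5 : k + 3 - k = 3 := by omega
        simp only [this, h5]
      rw [List.flatMap_congr (fun k _ => hsl k)]
      -- final bigram of A
      have hfin : String.ofList [PySem.List.pyGetD (' ' :: c :: (cs' ++ [' '])) (-2) ' ', ' ']
          = String.ofList (((' ' :: c :: (cs' ++ [' '])).drop (cs' ++ [' ']).length).take 2) := by
        rw [PySem.List.pyGetD_neg_ofNat _ 2 ' ' (by omega) (by simp)]
        rw [List.drop_eq_getElem_cons (by simp), List.drop_eq_getElem_cons (by simp)]
        have hidx : (' ' :: c :: (cs' ++ [' '])).length - 2 = (cs' ++ [' ']).length := by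
          simp
        simp only [hidx, List.take_succ_cons, List.take_zero]
        congr 2
        simp
      rw [hfin, List.append_assoc, pvA (cs' ++ [' ']) ' ' c]
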